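-- pv_equiv track=rewrite | github.com/lmochsner/15-112-Term-Project | TP3_Ochsner (1).py | changeDirections
-- ===== SOURCE A (Python) =====
-- def changeDirections(throwTracker): #the throw tracker should reset each time that a ball leaves the frame
--     # throw tracker-->this would be [([x,y,w,h], "Direction"), ["x2,y2,w2,h2,], "direction"]
--     prevDir = throwTracker[0][1]
--     if len(throwTracker) > 1: #there has been two points
--         for throw in throwTracker:
--             direction = throw[1]
--             if prevDir == None:
--                 prevDir = direction
--             else:
--                 if direction == None:
--                     continue #this data point may just be faulty
--                 elif direction == "AwayFromWall" and prevDir == "TowardsWall":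
--                     return True
--                 elif direction == "AwayFromWall" and prevDir == "Still":
--                     return True
--                 prevDir = direction
--     return False
-- ===== SOURCE B (Python) =====
-- def changeDirections(throwTracker):
--     # For each AwayFromWall reading, scan BACKWARDS through the readings seen so
--     # far for the most recent non-None direction; trigger if it was
--     # TowardsWall/Still. Different decomposition: no carried prevDir state.
--     seen = []
--     for throw in throwTracker:
--         if throw[1] == "AwayFromWall":
--             for d in reversed(seen):
--                 if d is not None:
--                     if d in ("TowardsWall", "Still"):
--                         return True
--                     break
--         seen.append(throw[1])
--     return False
-- ===== Notes on version B (the rewrite author's own statement) =====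
-- stated objective: alternative
-- what changed: Replaces A's single stateful pass carrying prevDir (with continue/early-return) by a stateless decomposition: for each AwayFromWall reading, scan backwards through the prefix of readings seen so far for the most recent non-None direction.
import Mathlib
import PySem

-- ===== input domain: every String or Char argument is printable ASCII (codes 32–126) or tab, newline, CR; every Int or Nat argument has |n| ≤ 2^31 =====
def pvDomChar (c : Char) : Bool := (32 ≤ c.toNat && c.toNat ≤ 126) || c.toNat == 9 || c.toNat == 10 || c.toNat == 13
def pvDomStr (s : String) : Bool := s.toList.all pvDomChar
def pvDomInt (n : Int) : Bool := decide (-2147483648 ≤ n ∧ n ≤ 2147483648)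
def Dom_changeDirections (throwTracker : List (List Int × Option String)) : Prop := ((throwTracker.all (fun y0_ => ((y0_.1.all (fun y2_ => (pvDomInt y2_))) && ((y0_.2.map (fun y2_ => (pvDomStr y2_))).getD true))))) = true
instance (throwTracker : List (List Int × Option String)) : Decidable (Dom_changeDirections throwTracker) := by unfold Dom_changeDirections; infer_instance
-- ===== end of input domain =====

-- B replaces A's stateful prevDir pass by a backward scan of the seen prefix at each
-- AwayFromWall reading (alternative decomposition, not claimed faster).


-- ===== PORT A =====
-- A's for-loop over the throws carrying the mutable prevDir, branch for branch.
def chdLoopA (prevDir : Option String) : List (List Int × Option String) → Bool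
  | [] => false
  | throw :: rest =>
    let direction := throw.2
    if prevDir = none then chdLoopA direction rest
    else if direction = none then chdLoopA prevDir rest
    else if direction = some "AwayFromWall" ∧ prevDir = some "TowardsWall" then true
    else if direction = some "AwayFromWall" ∧ prevDir = some "Still" then true
    else chdLoopA direction rest

def changeDirections (throwTracker : List (List Int × Option String)) : Bool :=
  match throwTracker with
  | [] => false  -- Python raises IndexError at throwTracker[0]; excluded by Pre_
  | t0 :: _ =>
    let prevDir := t0.2
    if throwTracker.length > 1 then chdLoopA prevDir throwTracker else false

-- ===== PORT B =====
-- Python's inner `for d in reversed(seen)` loop; `seen` is kept already reversed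
-- (elements are prepended as the outer loop appends), so this walks it head-first.
def chdBack : List (Option String) → Bool
  | [] => false
  | d? :: rest =>
    match d? with
    | none => chdBack rest
    | some d => (d == "TowardsWall") || (d == "Still")

-- the outer loop: first arg is `seen` in reverse order
def chdOuter : List (Option String) → List (List Int × Option String) → Bool
  | _, [] => false
  | seenRev, t :: rest =>
    if t.2 = some "AwayFromWall" then
      if chdBack seenRev then true
      else chdOuter (t.2 :: seenRev) rest
    else chdOuter (t.2 :: seenRev) rest

def changeDirections_alt (throwTracker : List (List Int × Option String)) : Bool :=
  chdOuter [] throwTracker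

-- ===== PRECONDITION & SPEC =====
-- Pre_ excludes only the empty list, on which Python A raises IndexError.
def Pre_changeDirections (throwTracker : List (List Int × Option String)) : Prop :=
  throwTracker ≠ []
instance (throwTracker : List (List Int × Option String)) : Decidable (Pre_changeDirections throwTracker) := by unfold Pre_changeDirections; infer_instance
def pvWitness_changeDirections : (List (List Int × Option String)) :=
  [([0, 1], some "TowardsWall"), ([2, 3], some "AwayFromWall")]

def Spec_changeDirections (throwTracker : List (List Int × Option String)) (out : Bool) : Prop := out = changeDirections_alt throwTracker
instance (throwTracker : List (List Int × Option String)) (out : Bool) : Decidable (Spec_changeDirections throwTracker out) := by unfold Spec_changeDirections; infer_instance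

-- ===== CLAIM (what is proved, stated in full; the proofs are below) =====
def Claim_equal_changeDirections : Prop := ∀ (throwTracker : List (List Int × Option String)), Dom_changeDirections throwTracker → Pre_changeDirections throwTracker → Spec_changeDirections throwTracker (changeDirections throwTracker)

-- ===== LEMMAS AND PROOFS =====

-- Common characterisation: the pairwise scan over the list of non-None directions.
def pairScan (dirs : List String) : Bool :=
  (dirs.zip dirs.tail).any
    (fun pc => ((pc.1 == "TowardsWall") || (pc.1 == "Still")) && (pc.2 == "AwayFromWall"))

def consOpt : Option String → List String → List String
  | none, l => l
  | some p, l => p :: l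

theorem pairScan_cons_cons (p c : String) (rest : List String) :
    pairScan (p :: c :: rest)
      = (((p == "TowardsWall") || (p == "Still")) && (c == "AwayFromWall")
          || pairScan (c :: rest)) := by
  simp [pairScan]

-- Loop invariant for A: chdLoopA with current prevDir equals the pairwise scan of
-- prevDir (if non-None) prepended to the remaining non-None directions.
theorem chdLoopA_eq (xs : List (List Int × Option String)) :
    (∀ p : String, chdLoopA (some p) xs = pairScan (p :: xs.filterMap (fun t => t.2))) ∧
    chdLoopA none xs = pairScan (xs.filterMap (fun t => t.2)) := by
  induction xs with
  | nil => exact ⟨fun p => rfl, rfl⟩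
  | cons t rest ih =>
    constructor
    · intro p
      cases hd : t.2 with
      | none =>
        simp only [chdLoopA, hd, List.filterMap_cons]
        simp [ih.1 p]
      | some d =>
        simp only [chdLoopA, hd, List.filterMap_cons]
        by_cases h1 : d = "AwayFromWall" ∧ p = "TowardsWall"
        · simp [h1.1, h1.2, pairScan_cons_cons]
        · by_cases h2 : d = "AwayFromWall" ∧ p = "Still"
          · simp [h2.1, h2.2, pairScan_cons_cons]
          · have hb : (((p == "TowardsWall") || (p == "Still")) && (d == "AwayFromWall")) = false := by
              by_cases hdA : d = "AwayFromWall"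
              · have hp1 : p ≠ "TowardsWall" := fun hc => h1 ⟨hdA, hc⟩
                have hp2 : p ≠ "Still" := fun hc => h2 ⟨hdA, hc⟩
                simp [hp1, hp2]
              · simp [hdA]
            have hA1 : ¬ (some d = some "AwayFromWall" ∧ some p = some "TowardsWall") := by
              intro hc; exact h1 ⟨Option.some.inj hc.1, Option.some.inj hc.2⟩
            have hA2 : ¬ (some d = some "AwayFromWall" ∧ some p = some "Still") := by
              intro hc; exact h2 ⟨Option.some.inj hc.1, Option.some.inj hc.2⟩
            simp only [hA1, hA2, if_false, if_neg (by simp : ¬ (some p = (none : Option String))),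
              if_neg (by simp : ¬ (some d = (none : Option String)))]
            rw [ih.1 d, pairScan_cons_cons, hb]
            simp
    · cases hd : t.2 with
      | none =>
        simp only [chdLoopA, hd, List.filterMap_cons]
        simpa using ih.2
      | some d =>
        simp only [chdLoopA, hd, List.filterMap_cons]
        simp [ih.1 d]

-- First loop iteration of A is a no-op: prevDir equals the first throw's own direction.
theorem chdLoopA_self (t : List Int × Option String) (rest : List (List Int × Option String)) :
    chdLoopA t.2 (t :: rest) = chdLoopA t.2 rest := by
  cases ht : t.2 with
  | none => simp [chdLoopA, ht]
  | some d =>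
    by_cases hdA : d = "AwayFromWall"
    · subst hdA; simp [chdLoopA, ht]
    · simp [chdLoopA, ht, hdA]

-- The backward scan only depends on the most recent non-None direction.
theorem chdBack_eq (s : List (Option String)) :
    chdBack s = match (s.filterMap id).head? with
      | none => false
      | some p => (p == "TowardsWall") || (p == "Still") := by
  induction s with
  | nil => rfl
  | cons d? rest ih =>
    cases d? with
    | none => simpa [chdBack] using ih
    | some d => simp [chdBack]

-- Loop invariant for B: chdOuter with seen prefix equals the pairwise scan of the
-- most recent non-None seen direction prepended to the remaining non-None directions.
theorem chdOuter_eq (xs : List (List Int × Option String)) (s : List (Option String)) :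
    chdOuter s xs = pairScan (consOpt (s.filterMap id).head? (xs.filterMap (fun t => t.2))) := by
  induction xs generalizing s with
  | nil =>
    cases h : (s.filterMap id).head? with
    | none => simp [chdOuter, consOpt, pairScan]
    | some p => simp [chdOuter, consOpt, pairScan]
  | cons t rest ih =>
    cases hd : t.2 with
    | none =>
      have hs : ((none :: s : List (Option String)).filterMap id).head? = (s.filterMap id).head? := by
        simp
      simp only [chdOuter, hd, reduceCtorEq, if_false]
      rw [ih (none :: s), hs,
        show (t :: rest).filterMap (fun t => t.2) = rest.filterMap (fun t => t.2) by
          simp [hd]]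
    | some d =>
      have hs : ((some d :: s : List (Option String)).filterMap id).head? = some d := by simp
      by_cases hdA : d = "AwayFromWall"
      · subst hdA
        simp only [chdOuter, hd]
        rw [if_pos trivial, chdBack_eq]
        cases hp : (s.filterMap id).head? with
        | none =>
          rw [ih (some "AwayFromWall" :: s), hs]
          simp [consOpt, hd]
        | some p =>
          by_cases hin : ((p == "TowardsWall") || (p == "Still")) = true
          · simp only [hin, if_true, consOpt, List.filterMap_cons, hd]
            rw [pairScan_cons_cons]
            simp [hin]
          · have hin' : ((p == "TowardsWall") || (p == "Still")) = false := by
              simpa using hin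
            simp only [hin', Bool.false_eq_true, if_false]
            rw [ih (some "AwayFromWall" :: s), hs]
            simp only [consOpt, List.filterMap_cons, hd]
            rw [pairScan_cons_cons, hin']
            simp
      · simp only [chdOuter, hd]
        rw [if_neg (by simp [hdA] : ¬ (some d = some "AwayFromWall"))]
        rw [ih (some d :: s), hs]
        cases hp : (s.filterMap id).head? with
        | none => simp [consOpt, hd]
        | some p =>
          simp only [consOpt, List.filterMap_cons, hd]
          rw [pairScan_cons_cons]
          simp [hdA]

theorem changeDirections_alt_eq (tt : List (List Int × Option String)) :
    changeDirections_alt tt = pairScan (tt.filterMap (fun t => t.2)) := by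
  unfold changeDirections_alt
  rw [chdOuter_eq]
  rfl

-- ===== VERDICT (by name: the statement is the Claim_ definition above) =====
theorem changeDirections_spec : Claim_equal_changeDirections := by
  intro tt _hDom hPre
  unfold Spec_changeDirections
  rw [changeDirections_alt_eq]
  cases tt with
  | nil => exact absurd rfl hPre
  | cons t0 rest =>
    cases rest with
    | nil =>
      cases hd : t0.2 with
      | none => simp [changeDirections, pairScan, hd]
      | some d => simp [changeDirections, pairScan, hd]
    | cons t1 rest' =>
      have hlen : (t0 :: t1 :: rest').length > 1 := by simp
      simp only [changeDirections, if_pos hlen]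
      rw [chdLoopA_self t0 (t1 :: rest')]
      cases hd : t0.2 with
      | none =>
        simp only [List.filterMap_cons, hd]
        exact (chdLoopA_eq (t1 :: rest')).2
      | some d =>
        simp only [List.filterMap_cons, hd]
        exact (chdLoopA_eq (t1 :: rest')).1 d
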